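-- pv_equiv track=rewrite | github.com/manohar12346/Leetcodemanohar | 10. Maximum occured integer - GFG/10.-maximum-occured-integer.py | maxOccured
-- ===== SOURCE A (Python) =====
-- def maxOccured(L,R,N,maxx):
--     x=[0]*(maxx+2)
--     for i in range(N):
--         x[L[i]]+=1
--         x[R[i]+1]-=1
--     m=x[0]
--     ans=0
--
--     for i in range(len(x)-1):
--
--         x[i+1]+=x[i]
--         if m<x[i]:
--             m=x[i]
--             ans=i
--     return ans
-- ===== SOURCE B (Python) =====
-- def maxOccured(L, R, N, maxx):
--     best = None
--     ans = 0
--     for i in range(maxx + 1):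
--         c = sum(1 for k in range(N) if L[k] <= i) - sum(1 for k in range(N) if R[k] < i)
--         if best is None or best < c:
--             best = c
--             ans = i
--     return ans
-- ===== Notes on version B (the rewrite author's own statement) =====
-- stated objective: alternative
-- what changed: B computes each index's coverage directly by counting the intervals that contain it and keeps a running first-argmax, instead of A's difference array with an in-place prefix-sum sweep.
-- outside the precondition, e.g. on maxOccured([-2], [1], 1, 1): A returns 1, B returns 0
import Mathlib
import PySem

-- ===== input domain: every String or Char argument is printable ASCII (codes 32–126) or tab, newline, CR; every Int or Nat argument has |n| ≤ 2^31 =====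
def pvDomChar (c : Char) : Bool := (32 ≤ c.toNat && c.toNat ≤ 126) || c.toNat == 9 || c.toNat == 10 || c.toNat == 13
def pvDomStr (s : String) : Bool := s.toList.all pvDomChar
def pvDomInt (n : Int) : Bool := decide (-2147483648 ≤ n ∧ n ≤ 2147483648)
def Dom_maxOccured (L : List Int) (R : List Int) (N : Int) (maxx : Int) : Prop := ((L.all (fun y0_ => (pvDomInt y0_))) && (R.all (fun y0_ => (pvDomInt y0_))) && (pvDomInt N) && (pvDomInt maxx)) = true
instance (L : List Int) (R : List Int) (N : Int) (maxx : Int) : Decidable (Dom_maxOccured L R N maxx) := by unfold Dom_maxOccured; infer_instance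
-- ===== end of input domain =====

-- B replaces A's difference array + in-place prefix-sum sweep by directly counting, for each
-- index 0..maxx, the intervals covering it, keeping a running first strict maximum (alternative
-- algorithm, same value; not claimed faster).

-- ===== PORT A =====
-- body of A's first loop: x[L[i]] += 1; x[R[i]+1] -= 1
def pvStepA1 (L R : List Int) (x : List Int) (i : Int) : List Int :=
  let x' := PySem.List.pySetD x (PySem.List.pyGetD L i 0)
              (PySem.List.pyGetD x (PySem.List.pyGetD L i 0) 0 + 1)
  PySem.List.pySetD x' (PySem.List.pyGetD R i 0 + 1)
              (PySem.List.pyGetD x' (PySem.List.pyGetD R i 0 + 1) 0 - 1)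

-- body of A's second loop: x[i+1] += x[i]; if m < x[i]: m, ans = x[i], i
def pvStepA2 (st : List Int × Int × Int) (i : Int) : List Int × Int × Int :=
  let x' := PySem.List.pySetD st.1 (i + 1)
              (PySem.List.pyGetD st.1 (i + 1) 0 + PySem.List.pyGetD st.1 i 0)
  if st.2.1 < PySem.List.pyGetD x' i 0 then (x', PySem.List.pyGetD x' i 0, i)
  else (x', st.2.1, st.2.2)

def maxOccured (L : List Int) (R : List Int) (N : Int) (maxx : Int) : Int :=
  let x1 := (PySem.List.pyRange 0 N 1).foldl (pvStepA1 L R) (List.replicate (maxx + 2).toNat 0)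
  ((PySem.List.pyRange 0 ((x1.length : Int) - 1) 1).foldl pvStepA2
      (x1, PySem.List.pyGetD x1 0 0, 0)).2.2

-- ===== PORT B =====
-- body of B's loop: coverage count of index i, then first strict-max update
def pvStepB (L R : List Int) (N : Int) (st : Option Int × Int) (i : Int) : Option Int × Int :=
  let c := ((PySem.List.pyRange 0 N 1).map
              (fun k => if PySem.List.pyGetD L k 0 ≤ i then (1 : Int) else 0)).sum
         - ((PySem.List.pyRange 0 N 1).map
              (fun k => if PySem.List.pyGetD R k 0 < i then (1 : Int) else 0)).sum
  match st.1 with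
  | none => (some c, i)
  | some b => if b < c then (some c, i) else st

def maxOccured_alt (L : List Int) (R : List Int) (N : Int) (maxx : Int) : Int :=
  ((PySem.List.pyRange 0 (maxx + 1) 1).foldl (pvStepB L R N) ((none : Option Int), 0)).2

-- ===== PRECONDITION & SPEC =====
-- Pre_ restricts to the natural domain of the problem: maxx ≥ -1, N within both list lengths
-- (A raises IndexError otherwise) and every interval endpoint with 0 ≤ L[k] ≤ maxx+1 and
-- -1 ≤ R[k] ≤ maxx: outside that A either raises IndexError or, on negative endpoints,
-- silently wraps around the array via Python negative indexing — an artefact excluded here.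
def Pre_maxOccured (L : List Int) (R : List Int) (N : Int) (maxx : Int) : Prop :=
  -1 ≤ maxx ∧ N ≤ (L.length : Int) ∧ N ≤ (R.length : Int) ∧
  ∀ k : Nat, k < N.toNat →
    (0 ≤ L.getD k 0 ∧ L.getD k 0 ≤ maxx + 1 ∧ -1 ≤ R.getD k 0 ∧ R.getD k 0 ≤ maxx)
instance (L : List Int) (R : List Int) (N : Int) (maxx : Int) : Decidable (Pre_maxOccured L R N maxx) := by unfold Pre_maxOccured; infer_instance

def pvWitness_maxOccured : List Int × List Int × Int × Int := ([1, 2, 0], [3, 3, 1], 3, 4)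

def Spec_maxOccured (L : List Int) (R : List Int) (N : Int) (maxx : Int) (out : Int) : Prop := out = maxOccured_alt L R N maxx
instance (L : List Int) (R : List Int) (N : Int) (maxx : Int) (out : Int) : Decidable (Spec_maxOccured L R N maxx out) := by unfold Spec_maxOccured; infer_instance

-- ===== CLAIM (what is proved, stated in full; the proofs are below) =====
def Claim_equal_maxOccured : Prop := ∀ (L : List Int) (R : List Int) (N : Int) (maxx : Int), Dom_maxOccured L R N maxx → Pre_maxOccured L R N maxx → Spec_maxOccured L R N maxx (maxOccured L R N maxx)

-- ===== LEMMAS AND PROOFS =====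

-- the difference array A builds, as a closed sum over the first n intervals
def pvDif (L R : List Int) (n : Nat) (j : Int) : Int :=
  ((List.range n).map (fun k =>
    (if L.getD k 0 = j then (1 : Int) else 0) - (if R.getD k 0 + 1 = j then (1 : Int) else 0))).sum

-- coverage of index i by the first n intervals (what B counts)
def pvCov (L R : List Int) (n : Nat) (i : Int) : Int :=
  ((List.range n).map (fun k =>
    (if L.getD k 0 ≤ i then (1 : Int) else 0) - (if R.getD k 0 < i then (1 : Int) else 0))).sum

-- B's per-index count, named
def pvCB (L R : List Int) (N : Int) (i : Int) : Int :=
  ((PySem.List.pyRange 0 N 1).map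
      (fun k => if PySem.List.pyGetD L k 0 ≤ i then (1 : Int) else 0)).sum
  - ((PySem.List.pyRange 0 N 1).map
      (fun k => if PySem.List.pyGetD R k 0 < i then (1 : Int) else 0)).sum

-- first strict-maximum scan of f over indices 0..n: (max value, first argmax)
def pvSweep (f : Nat → Int) : Nat → Int × Int
  | 0 => (f 0, 0)
  | n + 1 => if (pvSweep f n).1 < f (n + 1) then (f (n + 1), (n : Int) + 1) else pvSweep f n

-- the list A's second loop holds after i iterations of in-place prefix summation
def pvXiter (d : List Int) : Nat → List Int
  | 0 => d
  | i + 1 => PySem.List.pySetD (pvXiter d i) ((i : Int) + 1)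
      (PySem.List.pyGetD (pvXiter d i) ((i : Int) + 1) 0 + PySem.List.pyGetD (pvXiter d i) (i : Int) 0)

-- the value A's second loop compares at index i
def pvV (d : List Int) (i : Nat) : Int := PySem.List.pyGetD (pvXiter d i) (i : Int) 0

lemma pv_getD_setD (x : List Int) (a j v : Int) (ha : 0 ≤ a) (hj : 0 ≤ j)
    (hlt : a < (x.length : Int)) :
    PySem.List.pyGetD (PySem.List.pySetD x a v) j 0 = if j = a then v else PySem.List.pyGetD x j 0 := by
  by_cases hja : j = a
  · have h := PySem.List.pyGetD_pySetD_natCast x a.toNat j.toNat v 0 (by omega)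
    rw [Int.toNat_of_nonneg ha, Int.toNat_of_nonneg hj] at h
    rw [h, if_pos (by omega), if_pos hja]
  · have h := PySem.List.pyGetD_pySetD_natCast x a.toNat j.toNat v 0 (by omega)
    rw [Int.toNat_of_nonneg ha, Int.toNat_of_nonneg hj] at h
    rw [h, if_neg (by omega), if_neg hja]

lemma pv_lenA1 (L R : List Int) : ∀ (l : List Int) (x : List Int),
    (l.foldl (pvStepA1 L R) x).length = x.length := by
  intro l
  induction l with
  | nil => intro x; rfl
  | cons h t ih =>
    intro x
    rw [List.foldl_cons, ih]
    simp [pvStepA1, PySem.List.length_pySetD]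

lemma pv_step1_get (x : List Int) (maxx a r j : Int) (hxlen : (x.length : Int) = maxx + 2)
    (ha : 0 ≤ a) (ha2 : a ≤ maxx + 1) (hr : 0 ≤ r + 1) (hr2 : r + 1 ≤ maxx + 1) (hj : 0 ≤ j) :
    PySem.List.pyGetD (PySem.List.pySetD (PySem.List.pySetD x a (PySem.List.pyGetD x a 0 + 1)) (r + 1)
      (PySem.List.pyGetD (PySem.List.pySetD x a (PySem.List.pyGetD x a 0 + 1)) (r + 1) 0 - 1)) j 0
    = PySem.List.pyGetD x j 0
      + ((if a = j then (1 : Int) else 0) - (if r + 1 = j then (1 : Int) else 0)) := by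
  rw [pv_getD_setD _ (r + 1) j _ hr hj (by rw [PySem.List.length_pySetD]; omega)]
  rw [pv_getD_setD x a (r + 1) _ ha hr (by omega)]
  rw [pv_getD_setD x a j _ ha hj (by omega)]
  rcases eq_or_ne j (r + 1) with hrj | hrj <;> rcases eq_or_ne j a with haj | haj
  · have h2 : a = r + 1 := by omega
    subst hrj
    simp [h2]
  · subst hrj
    simp [haj, Ne.symm haj]
    try ring
  · subst haj
    simp [hrj, Ne.symm hrj]
    try ring
  · simp [hrj, haj, Ne.symm hrj, Ne.symm haj]
    try ring

lemma pv_fold1_get (L R : List Int) (maxx N : Int) (hm : -1 ≤ maxx)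
    (hk : ∀ k : Nat, k < N.toNat →
      (0 ≤ L.getD k 0 ∧ L.getD k 0 ≤ maxx + 1 ∧ -1 ≤ R.getD k 0 ∧ R.getD k 0 ≤ maxx)) :
    ∀ n : Nat, n ≤ N.toNat → ∀ j : Int, 0 ≤ j →
      PySem.List.pyGetD ((PySem.List.pyRange 0 (n : Int) 1).foldl (pvStepA1 L R)
        (List.replicate (maxx + 2).toNat 0)) j 0 = pvDif L R n j := by
  intro n
  induction n with
  | zero =>
    intro _ j hj
    simp only [Nat.cast_zero]
    rw [PySem.List.pyRange_one_eq_nil le_rfl]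
    simp only [List.foldl_nil]
    rw [← Int.toNat_of_nonneg hj, PySem.List.pyGetD_natCast]
    simp [pvDif, List.getD_eq_getElem?_getD, List.getElem?_replicate]
    split <;> rfl
  | succ n ih =>
    intro hn j hj
    have hc : ((n + 1 : Nat) : Int) = (n : Int) + 1 := by push_cast; ring
    rw [hc, PySem.List.pyRange_one_succ_right (by positivity), List.foldl_append]
    simp only [List.foldl_cons, List.foldl_nil, pvStepA1]
    rw [PySem.List.pyGetD_natCast L n 0, PySem.List.pyGetD_natCast R n 0]
    obtain ⟨h1, h2, h3, h4⟩ := hk n (by omega)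
    have hxlen : (((PySem.List.pyRange 0 (n : Int) 1).foldl (pvStepA1 L R)
        (List.replicate (maxx + 2).toNat 0)).length : Int) = maxx + 2 := by
      rw [pv_lenA1]
      simp
      omega
    rw [pv_step1_get _ maxx (L.getD n 0) (R.getD n 0) j hxlen (by omega) (by omega) (by omega)
      (by omega) hj]
    rw [ih (by omega) j hj]
    unfold pvDif
    rw [List.range_succ, List.map_append, List.sum_append]
    simp

lemma pv_len_xiter (d : List Int) : ∀ i : Nat, (pvXiter d i).length = d.length := by
  intro i
  induction i with
  | zero => rfl
  | succ i ih => simp [pvXiter, PySem.List.length_pySetD, ih]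

lemma pv_xiter_above (d : List Int) (maxx : Int) (hlen : (d.length : Int) = maxx + 2) :
    ∀ i : Nat, (i : Int) ≤ maxx + 1 → ∀ j : Int, (i : Int) < j →
      PySem.List.pyGetD (pvXiter d i) j 0 = PySem.List.pyGetD d j 0 := by
  intro i
  induction i with
  | zero => intro _ j _; rfl
  | succ i ih =>
    intro hle j hj
    have hc : ((i + 1 : Nat) : Int) = (i : Int) + 1 := by push_cast; ring
    rw [hc] at hle hj
    show PySem.List.pyGetD (PySem.List.pySetD (pvXiter d i) ((i : Int) + 1) _) j 0 = _
    rw [pv_getD_setD _ _ j _ (by omega) (by omega) (by rw [pv_len_xiter]; omega)]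
    rw [if_neg (by omega)]
    exact ih (by omega) j (by omega)

lemma pv_v_succ (d : List Int) (maxx : Int) (hlen : (d.length : Int) = maxx + 2)
    (i : Nat) (h : (i : Int) + 1 ≤ maxx + 1) :
    pvV d (i + 1) = PySem.List.pyGetD d ((i : Int) + 1) 0 + pvV d i := by
  have hc : ((i + 1 : Nat) : Int) = (i : Int) + 1 := by push_cast; ring
  show PySem.List.pyGetD (pvXiter d (i + 1)) ((i + 1 : Nat) : Int) 0 = _
  rw [hc]
  show PySem.List.pyGetD (PySem.List.pySetD (pvXiter d i) ((i : Int) + 1) _) ((i : Int) + 1) 0 = _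
  rw [pv_getD_setD _ _ _ _ (by omega) (by omega) (by rw [pv_len_xiter]; omega), if_pos rfl]
  rw [pv_xiter_above d maxx hlen i (by omega) ((i : Int) + 1) (by omega)]
  rfl

lemma pv_fold2 (d : List Int) (maxx : Int) (_hm : -1 ≤ maxx) (hlen : (d.length : Int) = maxx + 2) :
    ∀ m : Nat, (m : Int) ≤ maxx + 1 →
      (PySem.List.pyRange 0 (m : Int) 1).foldl pvStepA2 (d, PySem.List.pyGetD d 0 0, 0)
        = (pvXiter d m, pvSweep (pvV d) (m - 1)) := by
  intro m
  induction m with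
  | zero =>
    intro _
    simp only [Nat.cast_zero]
    rw [PySem.List.pyRange_one_eq_nil le_rfl]
    simp [pvSweep, pvV, pvXiter]
  | succ m ih =>
    intro hle
    have hc : ((m + 1 : Nat) : Int) = (m : Int) + 1 := by push_cast; ring
    rw [hc, PySem.List.pyRange_one_succ_right (by positivity), List.foldl_append, ih (by omega)]
    simp only [List.foldl_cons, List.foldl_nil, pvStepA2]
    have hx' : PySem.List.pySetD (pvXiter d m) ((m : Int) + 1)
        (PySem.List.pyGetD (pvXiter d m) ((m : Int) + 1) 0
          + PySem.List.pyGetD (pvXiter d m) (m : Int) 0) = pvXiter d (m + 1) := rfl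
    have hv : PySem.List.pyGetD (pvXiter d (m + 1)) (m : Int) 0 = pvV d m := by
      rw [← hx', pv_getD_setD _ _ _ _ (by omega) (by omega) (by rw [pv_len_xiter]; omega),
        if_neg (by omega)]
      rfl
    rw [hx', hv]
    cases m with
    | zero => simp [pvSweep]
    | succ k =>
      simp only [Nat.add_sub_cancel]
      rw [pvSweep]
      split_ifs with h
      · norm_cast
      · simp

lemma pv_stepB_eq (L R : List Int) (N : Int) (st : Option Int × Int) (i : Int) :
    pvStepB L R N st i = match st.1 with
      | none => (some (pvCB L R N i), i)
      | some b => if b < pvCB L R N i then (some (pvCB L R N i), i) else st := rfl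

lemma pv_foldB (L R : List Int) (N : Int) :
    ∀ m : Nat, (PySem.List.pyRange 0 (m : Int) 1).foldl (pvStepB L R N) ((none : Option Int), 0)
      = if m = 0 then ((none : Option Int), 0)
        else (some (pvSweep (fun j => pvCB L R N (j : Int)) (m - 1)).1,
              (pvSweep (fun j => pvCB L R N (j : Int)) (m - 1)).2) := by
  intro m
  induction m with
  | zero =>
    simp only [Nat.cast_zero]
    rw [PySem.List.pyRange_one_eq_nil le_rfl]
    simp
  | succ m ih =>
    have hc : ((m + 1 : Nat) : Int) = (m : Int) + 1 := by push_cast; ring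
    rw [hc, PySem.List.pyRange_one_succ_right (by positivity), List.foldl_append, ih]
    simp only [List.foldl_cons, List.foldl_nil, pv_stepB_eq]
    cases m with
    | zero =>
      simp [pvSweep]
    | succ k =>
      rw [if_neg (Nat.succ_ne_zero k), if_neg (Nat.succ_ne_zero (k + 1))]
      simp only [Nat.add_sub_cancel]
      rw [pvSweep]
      have hck : ((k + 1 : Nat) : Int) = (k : Int) + 1 := by push_cast; ring
      split_ifs with h
      · simp [hck]
      · rfl

lemma pv_sum_map_sub_int {α : Type} (xs : List α) (f g : α → Int) :
    (xs.map (fun x => f x - g x)).sum = (xs.map f).sum - (xs.map g).sum := by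
  induction xs with
  | nil => simp
  | cons a t ih => simp [ih]; ring

lemma pv_cB_eq_cov (L R : List Int) (N : Int) (i : Int) :
    pvCB L R N i = pvCov L R N.toNat i := by
  unfold pvCB pvCov
  rw [PySem.List.pyRange_one 0 N]
  simp only [zero_add, Int.sub_zero, List.map_map]
  rw [← pv_sum_map_sub_int]
  apply congrArg List.sum
  apply List.map_congr_left
  intro k _
  simp [Function.comp, PySem.List.pyGetD_natCast]

lemma pv_cov_succ (L R : List Int) (n : Nat) (i : Int) :
    pvCov L R n (i + 1) = pvCov L R n i + pvDif L R n (i + 1) := by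
  unfold pvCov pvDif
  have h : ∀ k ∈ List.range n,
      ((if L.getD k 0 ≤ i + 1 then (1 : Int) else 0) - (if R.getD k 0 < i + 1 then (1 : Int) else 0))
      = ((if L.getD k 0 ≤ i then (1 : Int) else 0) - (if R.getD k 0 < i then (1 : Int) else 0))
        + ((if L.getD k 0 = i + 1 then (1 : Int) else 0) - (if R.getD k 0 + 1 = i + 1 then (1 : Int) else 0)) := by
    intro k _
    split_ifs <;> omega
  rw [List.map_congr_left h, PySem.List.sum_map_add_int]

lemma pv_cov_base (L R : List Int) (maxx : Int) (n : Nat)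
    (hk : ∀ k : Nat, k < n →
      (0 ≤ L.getD k 0 ∧ L.getD k 0 ≤ maxx + 1 ∧ -1 ≤ R.getD k 0 ∧ R.getD k 0 ≤ maxx)) :
    pvCov L R n 0 = pvDif L R n 0 := by
  unfold pvCov pvDif
  apply congrArg List.sum
  apply List.map_congr_left
  intro k hk'
  rw [List.mem_range] at hk'
  obtain ⟨h1, h2, h3, h4⟩ := hk k hk'
  split_ifs <;> omega

lemma pv_v_eq_cov (L R : List Int) (N maxx : Int) (d : List Int)
    (_hm : -1 ≤ maxx) (hlen : (d.length : Int) = maxx + 2)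
    (hd : ∀ j : Int, 0 ≤ j → PySem.List.pyGetD d j 0 = pvDif L R N.toNat j)
    (hk : ∀ k : Nat, k < N.toNat →
      (0 ≤ L.getD k 0 ∧ L.getD k 0 ≤ maxx + 1 ∧ -1 ≤ R.getD k 0 ∧ R.getD k 0 ≤ maxx)) :
    ∀ i : Nat, (i : Int) ≤ maxx → pvV d i = pvCov L R N.toNat (i : Int) := by
  intro i
  induction i with
  | zero =>
    intro _
    have hv0 : pvV d 0 = PySem.List.pyGetD d 0 0 := rfl
    rw [hv0, hd 0 le_rfl, ← pv_cov_base L R maxx N.toNat hk]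
    norm_num
  | succ i ih =>
    intro hle
    have hc : ((i + 1 : Nat) : Int) = (i : Int) + 1 := by push_cast; ring
    rw [hc] at hle ⊢
    rw [pv_v_succ d maxx hlen i (by omega), hd ((i : Int) + 1) (by omega), ih (by omega),
      pv_cov_succ]
    ring

lemma pv_sweep_congr (f g : Nat → Int) : ∀ n : Nat, (∀ j : Nat, j ≤ n → f j = g j) →
    pvSweep f n = pvSweep g n := by
  intro n
  induction n with
  | zero => intro h; simp [pvSweep, h 0 le_rfl]
  | succ n ih =>
    intro h
    rw [pvSweep, pvSweep, ih (fun j hj => h j (Nat.le_succ_of_le hj)), h (n + 1) le_rfl]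

-- ===== VERDICT (by name: the statement is the Claim_ definition above) =====
theorem maxOccured_spec : Claim_equal_maxOccured := by
  intro L R N maxx _ hPre
  obtain ⟨hm, hNL, hNR, hk⟩ := hPre
  unfold Spec_maxOccured
  simp only [maxOccured, maxOccured_alt]
  set d := (PySem.List.pyRange 0 N 1).foldl (pvStepA1 L R) (List.replicate (maxx + 2).toNat 0)
    with hddef
  have hlen : (d.length : Int) = maxx + 2 := by
    rw [hddef, pv_lenA1]
    simp
    omega
  have h1 : (d.length : Int) - 1 = maxx + 1 := by omega
  rw [h1]
  have hdget : ∀ j : Int, 0 ≤ j → PySem.List.pyGetD d j 0 = pvDif L R N.toNat j := by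
    intro j hj
    have hr : PySem.List.pyRange 0 N 1 = PySem.List.pyRange 0 ((N.toNat : Nat) : Int) 1 := by
      by_cases h : 0 ≤ N
      · rw [Int.toNat_of_nonneg h]
      · rw [PySem.List.pyRange_one_eq_nil (by omega), PySem.List.pyRange_one_eq_nil (by omega)]
    rw [hddef, hr]
    exact pv_fold1_get L R maxx N hm hk N.toNat le_rfl j hj
  have hT : (((maxx + 1).toNat : Nat) : Int) = maxx + 1 := Int.toNat_of_nonneg (by omega)
  rw [← hT, pv_fold2 d maxx hm hlen (maxx + 1).toNat (by omega), pv_foldB L R N (maxx + 1).toNat]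
  by_cases hT0 : (maxx + 1).toNat = 0
  · simp [hT0, pvSweep]
  · rw [if_neg hT0]
    obtain ⟨t, ht⟩ : ∃ t, (maxx + 1).toNat = t + 1 := ⟨(maxx + 1).toNat - 1, by omega⟩
    have htI : (t : Int) = maxx := by omega
    rw [ht]
    simp only [Nat.add_sub_cancel]
    have hcong : pvSweep (pvV d) t = pvSweep (fun j => pvCB L R N (j : Int)) t := by
      apply pv_sweep_congr
      intro j hj
      rw [pv_v_eq_cov L R N maxx d hm hlen hdget hk j (by omega), pv_cB_eq_cov L R N]
    rw [hcong]
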